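-- pv_equiv track=rewrite | github.com/extra-virgin-olive-eul/pe_solutions | 67/generalized.py | find_max_sequence
-- ===== SOURCE A (Python) =====
-- def find_max_sequence(tree, level=0, idx=0, max_seq=None):
--     """
--     Starting at the root, recursively traverse the tree by choosing
--     the next child with the greatest value.
--
--     Once we reach the bottom-most-level, return the sequence.
--     """
--     if max_seq is None:
--         max_seq = [tree[0][0]['value']]
--
--     if level == len(tree)-1:
--         return max_seq
--     else:
--         left, right = tree[level+1][idx], tree[level+1][idx+1]
--
--         if level == len(tree)-2:
--             key = 'value'
--         else:
--             key = 'running_total'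
--
--         if left[key] > right[key]:
--             max_seq.append(left['value'])
--         else:
--             max_seq.append(right['value'])
--             idx = idx+1
--
--         return find_max_sequence(tree, level=level+1, idx=idx, max_seq=max_seq)
-- ===== SOURCE B (Python) =====
-- def find_max_sequence(tree, level=0, idx=0, max_seq=None):
--     """Two staged passes instead of recursion: first a while loop collects the
--     (level, column) pairs of the chosen path, then a second pass appends the
--     values along it. Appends to max_seq in place and returns the same list
--     object, like the original."""
--     if max_seq is None:
--         max_seq = [tree[0][0]['value']]
--     n = len(tree)
--     # stage 1: descend, recording the column picked at each deeper level
--     cols = []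
--     lv, j = level, idx
--     while lv != n - 1:
--         lv += 1
--         key = 'value' if lv == n - 1 else 'running_total'
--         if not (tree[lv][j][key] > tree[lv][j + 1][key]):
--             j += 1
--         cols.append((lv, j))
--     # stage 2: the values along that path
--     for lv, j in cols:
--         max_seq.append(tree[lv][j]['value'])
--     return max_seq
-- ===== Notes on version B (the rewrite author's own statement) =====
-- stated objective: alternative
-- what changed: A's single tail recursion interleaving comparison and append is replaced by two staged passes: a while loop first records the (level, column) pair chosen at each step, then a second pass appends the values along that path.
import Mathlib
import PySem

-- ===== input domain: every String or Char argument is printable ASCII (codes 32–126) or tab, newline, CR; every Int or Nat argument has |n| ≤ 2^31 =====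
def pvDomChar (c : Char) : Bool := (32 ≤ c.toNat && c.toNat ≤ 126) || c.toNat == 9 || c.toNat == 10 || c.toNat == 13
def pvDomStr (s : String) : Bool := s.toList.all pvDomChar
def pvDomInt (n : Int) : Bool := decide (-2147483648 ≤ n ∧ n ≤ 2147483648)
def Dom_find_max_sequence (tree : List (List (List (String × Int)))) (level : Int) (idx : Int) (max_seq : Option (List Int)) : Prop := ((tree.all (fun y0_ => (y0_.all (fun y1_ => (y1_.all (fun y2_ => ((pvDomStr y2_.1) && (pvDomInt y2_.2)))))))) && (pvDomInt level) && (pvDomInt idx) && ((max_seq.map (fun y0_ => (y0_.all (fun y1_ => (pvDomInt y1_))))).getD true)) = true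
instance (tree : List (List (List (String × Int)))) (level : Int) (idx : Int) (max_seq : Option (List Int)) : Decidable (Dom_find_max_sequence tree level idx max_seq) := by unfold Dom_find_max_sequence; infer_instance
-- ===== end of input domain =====

-- B replaces A's single tail recursion by two staged passes: first a while-loop descent recording
-- the (level, column) pair chosen at each step, then a pass appending the values along that path
-- (alternative decomposition, same cost). Both Pythons append to max_seq in place and return that same list object; the
-- equivalence proved here is about the RETURN value.

-- ===== PORT A =====
-- initial max_seq: `[tree[0][0]['value']]` when None (each `none` below is a Python raise, outside Pre_)
def pvInitSeq (tree : List (List (List (String × Int)))) (max_seq : Option (List Int)) : List Int :=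
  match max_seq with
  | some s => s
  | none =>
    match PySem.List.pyGet? tree 0 with
    | none => []
    | some r0 =>
      match PySem.List.pyGet? r0 0 with
      | none => []
      | some nd =>
        match List.lookup "value" nd with  -- dict lookup: first match in the association list
        | none => []
        | some v => [v]

-- termination lemma cited by findMaxGoA's decreasing_by (keeps the recursion's proof terms small)
lemma pvDescLt {b : Type} (xs : List b) (level : Int) {r : b}
    (h : PySem.List.pyGet? xs (level + 1) = some r) :
    ((xs.length : Int) + 1 - (level + 1)).toNat < ((xs.length : Int) + 1 - level).toNat := by
  have hin : ¬ (PySem.List.pyGet? xs (level + 1) = none) := by simp [h]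
  rw [PySem.List.pyGet?_eq_none_iff] at hin
  simp only [PySem.Raise.InRange] at hin
  omega

-- the recursive body of A after max_seq has been initialised
def findMaxGoA (tree : List (List (List (String × Int)))) (level idx : Int) (ms : List Int) : List Int :=
  if level = (tree.length : Int) - 1 then ms
  else
    match h : PySem.List.pyGet? tree (level + 1) with
    | none => ms  -- IndexError in Python
    | some row =>
      match PySem.List.pyGet? row idx, PySem.List.pyGet? row (idx + 1) with
      | some left, some right =>
        let key := if level = (tree.length : Int) - 2 then "value" else "running_total"
        match List.lookup key left, List.lookup key right with
        | some lk, some rk =>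
          if lk > rk then
            match List.lookup "value" left with
            | none => ms  -- KeyError
            | some lv => findMaxGoA tree (level + 1) idx (ms ++ [lv])
          else
            match List.lookup "value" right with
            | none => ms  -- KeyError
            | some rv => findMaxGoA tree (level + 1) (idx + 1) (ms ++ [rv])
        | _, _ => ms  -- KeyError
      | _, _ => ms  -- IndexError
termination_by ((tree.length : Int) + 1 - level).toNat
decreasing_by
  all_goals exact pvDescLt tree level h

def find_max_sequence (tree : List (List (List (String × Int)))) (level : Int) (idx : Int) (max_seq : Option (List Int)) : List Int :=
  findMaxGoA tree level idx (pvInitSeq tree max_seq)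

-- ===== PORT B =====
-- B's stage 1: the while loop `while lv != n - 1`, carrying (lv, j) and collecting the
-- (level, column) pair picked at each step; `none` marks a Python raise, outside Pre_
def bCols (tree : List (List (List (String × Int)))) (lv j : Int) : Option (List (Int × Int)) :=
  if lv = (tree.length : Int) - 1 then some []
  else
    let key := if lv + 1 = (tree.length : Int) - 1 then "value" else "running_total"
    match h : PySem.List.pyGet? tree (lv + 1) with
    | none => none  -- IndexError
    | some row =>
      ((PySem.List.pyGet? row j).bind (List.lookup key)).bind (fun ak =>
      ((PySem.List.pyGet? row (j + 1)).bind (List.lookup key)).bind (fun bk =>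
        let j' := if ak > bk then j else j + 1
        (bCols tree (lv + 1) j').map (fun cs => (lv + 1, j') :: cs)))
termination_by ((tree.length : Int) + 1 - lv).toNat
decreasing_by
  all_goals exact pvDescLt tree lv h

-- B's stage 2: the values along the recorded path
def bVals (tree : List (List (List (String × Int)))) : List (Int × Int) → Option (List Int)
  | [] => some []
  | (lv, j) :: rest =>
    ((PySem.List.pyGet? tree lv).bind (fun row =>
      (PySem.List.pyGet? row j).bind (List.lookup "value"))).bind (fun v =>
    (bVals tree rest).map (fun vs => v :: vs))

-- B's init: `[tree[0][0]['value']]` when max_seq is None (Option.toList gives [] on a raise)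
def bInit (tree : List (List (List (String × Int)))) (max_seq : Option (List Int)) : List Int :=
  max_seq.getD
    (((PySem.List.pyGet? tree 0).bind (fun r =>
        (PySem.List.pyGet? r 0).bind (List.lookup "value"))).toList)

def find_max_sequence_alt (tree : List (List (List (String × Int)))) (level : Int) (idx : Int) (max_seq : Option (List Int)) : List Int :=
  match bCols tree level idx with
  | none => []  -- raise in stage 1
  | some cols =>
    match bVals tree cols with
    | none => []  -- raise in stage 2
    | some vs => bInit tree max_seq ++ vs

-- ===== PRECONDITION & SPEC =====
-- node (l, j) of the tree exists (Python index semantics, so negative l/j wrap) and carries key k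
def pvNodeKey (tree : List (List (List (String × Int)))) (l j : Int) (k : String) : Bool :=
  match PySem.List.pyGet? tree l with
  | none => false
  | some row =>
    match PySem.List.pyGet? row j with
    | none => false
    | some nd => (List.lookup k nd).isSome

-- the window of nodes the descent from (level, idx) can touch: on each lower row the columns
-- idx .. idx+k+1 exist and carry 'value' (and 'running_total' above the bottom row); the
-- row count is clamped from below at level = -len-1 so deciding it is always O(len)
-- (below that bound A's very first index is out of range and Pre_'s first conjunct is false)
def pvWin (tree : List (List (List (String × Int)))) (level idx : Int) : Prop :=
  ∀ k ∈ List.range (((tree.length : Int) - 1 - max level (-(tree.length : Int) - 1)).toNat),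
    ∀ j ∈ List.range (k + 2),
      pvNodeKey tree (level + 1 + (k : Int)) (idx + (j : Int)) "value" = true ∧
      (level + 1 + (k : Int) < (tree.length : Int) - 1 →
        pvNodeKey tree (level + 1 + (k : Int)) (idx + (j : Int)) "running_total" = true)

-- Pre_ excludes exactly inputs on which A raises, except that the per-row window slightly
-- over-approximates the columns the descent really visits, so it also excludes some inputs
-- where A returns — on those A and B agree (see the cite).
def Pre_find_max_sequence (tree : List (List (List (String × Int)))) (level : Int) (idx : Int) (max_seq : Option (List Int)) : Prop :=
  -(tree.length : Int) - 1 ≤ level ∧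
  level ≤ (tree.length : Int) - 1 ∧
  (max_seq = none → pvNodeKey tree 0 0 "value" = true) ∧
  pvWin tree level idx
instance (tree : List (List (List (String × Int)))) (level : Int) (idx : Int) (max_seq : Option (List Int)) : Decidable (Pre_find_max_sequence tree level idx max_seq) := by unfold Pre_find_max_sequence pvWin; infer_instance

def pvWitness_find_max_sequence : (List (List (List (String × Int)))) × Int × Int × Option (List Int) :=
  ([[[("value", 3)]]], 0, 0, none)

def Spec_find_max_sequence (tree : List (List (List (String × Int)))) (level : Int) (idx : Int) (max_seq : Option (List Int)) (out : List Int) : Prop := out = find_max_sequence_alt tree level idx max_seq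
instance (tree : List (List (List (String × Int)))) (level : Int) (idx : Int) (max_seq : Option (List Int)) (out : List Int) : Decidable (Spec_find_max_sequence tree level idx max_seq out) := by unfold Spec_find_max_sequence; infer_instance

-- ===== CLAIM (what is proved, stated in full; the proofs are below) =====
def Claim_equal_find_max_sequence : Prop := ∀ (tree : List (List (List (String × Int)))) (level : Int) (idx : Int) (max_seq : Option (List Int)), Dom_find_max_sequence tree level idx max_seq → Pre_find_max_sequence tree level idx max_seq → Spec_find_max_sequence tree level idx max_seq (find_max_sequence tree level idx max_seq)

-- ===== LEMMAS AND PROOFS =====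

-- the two inits agree
lemma bInit_eq (tree : List (List (List (String × Int)))) (max_seq : Option (List Int)) :
    bInit tree max_seq = pvInitSeq tree max_seq := by
  cases max_seq with
  | some s => rfl
  | none =>
    unfold bInit pvInitSeq
    cases h0 : PySem.List.pyGet? tree 0 with
    | none => rfl
    | some r0 =>
      cases h1 : PySem.List.pyGet? r0 0 with
      | none => simp [h1]
      | some nd =>
        cases h2 : List.lookup "value" nd with
        | none => simp [h1, h2]
        | some v => simp [h1, h2]

-- unfolding lemma for A's guarded recursion (the `h :` match blocks plain `rw`)
lemma goA_some {tree : List (List (List (String × Int)))} {level idx : Int} {ms : List Int}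
    {row : List (List (String × Int))}
    (hl : ¬ level = (tree.length : Int) - 1)
    (hget : PySem.List.pyGet? tree (level + 1) = some row) :
    findMaxGoA tree level idx ms =
      match PySem.List.pyGet? row idx, PySem.List.pyGet? row (idx + 1) with
      | some left, some right =>
        match List.lookup (if level = (tree.length : Int) - 2 then "value" else "running_total") left,
              List.lookup (if level = (tree.length : Int) - 2 then "value" else "running_total") right with
        | some lk, some rk =>
          if lk > rk then
            match List.lookup "value" left with
            | none => ms
            | some lv => findMaxGoA tree (level + 1) idx (ms ++ [lv])
          else
            match List.lookup "value" right with
            | none => ms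
            | some rv => findMaxGoA tree (level + 1) (idx + 1) (ms ++ [rv])
        | _, _ => ms
      | _, _ => ms := by
  rw [findMaxGoA, if_neg hl]
  split
  next h => rw [h] at hget; cases hget
  next row' h => rw [hget] at h; cases h; rfl

-- what a true pvNodeKey yields
lemma nodeKey_spec {tree : List (List (List (String × Int)))} {l j : Int} {k : String}
    (h : pvNodeKey tree l j k = true) :
    ∃ row nd, PySem.List.pyGet? tree l = some row ∧ PySem.List.pyGet? row j = some nd ∧
      (List.lookup k nd).isSome = true := by
  unfold pvNodeKey at h
  split at h
  · cases h
  next row hrow =>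
    split at h
    · cases h
    next nd hnd => exact ⟨row, nd, hrow, hnd, h⟩

-- proof-side form of the window, with the un-clamped row count (used only by the proofs)
def pvWinCore (tree : List (List (List (String × Int)))) (level idx : Int) : Prop :=
  ∀ k ∈ List.range (((tree.length : Int) - 1 - level).toNat),
    ∀ j ∈ List.range (k + 2),
      pvNodeKey tree (level + 1 + (k : Int)) (idx + (j : Int)) "value" = true ∧
      (level + 1 + (k : Int) < (tree.length : Int) - 1 →
        pvNodeKey tree (level + 1 + (k : Int)) (idx + (j : Int)) "running_total" = true)

-- on the band Pre_ admits, the clamped window is the real one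
lemma winCore_of_win {tree : List (List (List (String × Int)))} {level idx : Int}
    (hg : -(tree.length : Int) - 1 ≤ level) (hw : pvWin tree level idx) :
    pvWinCore tree level idx := by
  have hmax : max level (-(tree.length : Int) - 1) = level := max_eq_left hg
  intro k hk
  exact hw k (by rwa [hmax])

-- the window survives one descent step (the column moves by δ ∈ {0, 1})
lemma win_step {tree : List (List (List (String × Int)))} {level idx : Int} (δ : Nat)
    (hδ : δ ≤ 1) (hw : pvWinCore tree level idx) :
    pvWinCore tree (level + 1) (idx + (δ : Int)) := by
  intro k' hk' j' hj'
  simp only [List.mem_range] at hk' hj'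
  have hk : k' + 1 ∈ List.range ((tree.length : Int) - 1 - level).toNat := by
    simp only [List.mem_range]; omega
  have hj : j' + δ ∈ List.range ((k' + 1) + 2) := by
    simp only [List.mem_range]; omega
  have h := hw (k' + 1) hk (j' + δ) hj
  have e1 : level + 1 + ((k' + 1 : Nat) : Int) = level + 1 + 1 + (k' : Int) := by push_cast; ring
  have e2 : idx + ((j' + δ : Nat) : Int) = idx + (δ : Int) + (j' : Int) := by push_cast; ring
  rw [e1, e2] at h
  exact h

-- unfold bCols past its `h :` match, given the next row exists
lemma bCols_some {tree : List (List (List (String × Int)))} {lv j : Int}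
    {row : List (List (String × Int))}
    (hl : ¬ lv = (tree.length : Int) - 1)
    (hget : PySem.List.pyGet? tree (lv + 1) = some row) :
    bCols tree lv j =
      ((PySem.List.pyGet? row j).bind
          (List.lookup (if lv + 1 = (tree.length : Int) - 1 then "value" else "running_total"))).bind (fun ak =>
      ((PySem.List.pyGet? row (j + 1)).bind
          (List.lookup (if lv + 1 = (tree.length : Int) - 1 then "value" else "running_total"))).bind (fun bk =>
        (bCols tree (lv + 1) (if ak > bk then j else j + 1)).map
          (fun cs => (lv + 1, (if ak > bk then j else j + 1)) :: cs))) := by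
  rw [bCols, if_neg hl]
  by_cases hc : lv + 1 = (tree.length : Int) - 1
  · simp only [if_pos hc]
    split
    next h => rw [h] at hget; cases hget
    next row' h => rw [hget] at h; cases h; rfl
  · simp only [if_neg hc]
    split
    next h => rw [h] at hget; cases hget
    next row' h => rw [hget] at h; cases h; rfl

-- main alignment: under the window, A's recursion produces exactly ms ++ (B's staged values)
lemma go_eq (tree : List (List (List (String × Int)))) :
    ∀ (m : Nat) (level idx : Int) (ms : List Int),
      ((tree.length : Int) - 1 - level).toNat = m →
      level ≤ (tree.length : Int) - 1 →
      pvWinCore tree level idx →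
      ∃ cols vs,
        bCols tree level idx = some cols ∧
        bVals tree cols = some vs ∧
        findMaxGoA tree level idx ms = ms ++ vs := by
  intro m
  induction m with
  | zero =>
    intro level idx ms hm hle _hw
    have hl : level = (tree.length : Int) - 1 := by omega
    refine ⟨[], [], by rw [bCols, if_pos hl], rfl, ?_⟩
    rw [findMaxGoA, if_pos hl]
    simp
  | succ m ih =>
    intro level idx ms hm hle hw
    have hl : ¬ level = (tree.length : Int) - 1 := by omega
    -- the two touched nodes of the next row, from the window at k = 0
    have h0 := hw 0 (by simp only [List.mem_range]; omega)
    have hv0 := (h0 0 (by simp)).1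
    have hv1 := (h0 1 (by simp)).1
    have hrt0 := (h0 0 (by simp)).2
    have hrt1 := (h0 1 (by simp)).2
    simp only [Nat.cast_zero, Nat.cast_one, add_zero] at hv0 hv1 hrt0 hrt1
    obtain ⟨row, nd0, hrow, hnd0, hval0⟩ := nodeKey_spec hv0
    obtain ⟨row', nd1, hrow', hnd1, hval1⟩ := nodeKey_spec hv1
    rw [hrow] at hrow'
    cases hrow'
    -- key lookups succeed for the comparison key of this row
    have hkey0 : (List.lookup (if level = (tree.length : Int) - 2 then "value" else "running_total") nd0).isSome = true := by
      by_cases hc : level = (tree.length : Int) - 2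
      · rw [if_pos hc]; exact hval0
      · rw [if_neg hc]
        obtain ⟨r2, n2, hr2, hn2, hk2⟩ := nodeKey_spec (hrt0 (by omega))
        rw [hrow] at hr2; cases hr2; rw [hnd0] at hn2; cases hn2; exact hk2
    have hkey1 : (List.lookup (if level = (tree.length : Int) - 2 then "value" else "running_total") nd1).isSome = true := by
      by_cases hc : level = (tree.length : Int) - 2
      · rw [if_pos hc]; exact hval1
      · rw [if_neg hc]
        obtain ⟨r2, n2, hr2, hn2, hk2⟩ := nodeKey_spec (hrt1 (by omega))
        rw [hrow] at hr2; cases hr2; rw [hnd1] at hn2; cases hn2; exact hk2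
    obtain ⟨ak, hak⟩ := Option.isSome_iff_exists.mp hkey0
    obtain ⟨bk, hbk⟩ := Option.isSome_iff_exists.mp hkey1
    obtain ⟨lv, hlv⟩ := Option.isSome_iff_exists.mp hval0
    obtain ⟨rv, hrv⟩ := Option.isSome_iff_exists.mp hval1
    -- B's key test on row level+1 agrees with A's on level
    have hkeyeq : (if level + 1 = (tree.length : Int) - 1 then "value" else "running_total")
        = (if level = (tree.length : Int) - 2 then "value" else "running_total") := by
      by_cases hc : level = (tree.length : Int) - 2
      · rw [if_pos hc, if_pos (by omega)]
      · rw [if_neg hc, if_neg (by omega)]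
    by_cases hcmp : ak > bk
    · -- left child wins: column stays at idx
      obtain ⟨cols, vs, hc1, hc2, hc3⟩ :=
        ih (level + 1) idx (ms ++ [lv]) (by omega) (by omega)
          (by simpa using win_step 0 (by omega) hw)
      refine ⟨(level + 1, idx) :: cols, lv :: vs, ?_, ?_, ?_⟩
      · rw [bCols_some hl hrow, hkeyeq, hnd0, hnd1]
        simp only [Option.bind_some, hak, hbk, Option.bind_some, if_pos hcmp, hc1,
          Option.map_some]
      · simp only [bVals, hrow, Option.bind_some, hnd0, hlv, Option.bind_some, hc2,
          Option.map_some]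
      · rw [goA_some hl hrow, hnd0, hnd1]
        dsimp only
        rw [hak, hbk]
        dsimp only
        rw [if_pos hcmp, hlv]
        dsimp only
        rw [hc3]
        simp
    · -- right child wins: column moves to idx + 1
      obtain ⟨cols, vs, hc1, hc2, hc3⟩ :=
        ih (level + 1) (idx + 1) (ms ++ [rv]) (by omega) (by omega)
          (by simpa using win_step 1 (by omega) hw)
      refine ⟨(level + 1, idx + 1) :: cols, rv :: vs, ?_, ?_, ?_⟩
      · rw [bCols_some hl hrow, hkeyeq, hnd0, hnd1]
        simp only [Option.bind_some, hak, hbk, Option.bind_some, if_neg hcmp, hc1,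
          Option.map_some]
      · simp only [bVals, hrow, Option.bind_some, hnd1, hrv, Option.bind_some, hc2,
          Option.map_some]
      · rw [goA_some hl hrow, hnd0, hnd1]
        dsimp only
        rw [hak, hbk]
        dsimp only
        rw [if_neg hcmp, hrv]
        dsimp only
        rw [hc3]
        simp

-- ===== VERDICT (by name: the statement is the Claim_ definition above) =====
theorem find_max_sequence_spec : Claim_equal_find_max_sequence := by
  intro tree level idx max_seq _hdom hpre
  obtain ⟨hg, hle, -, hw⟩ := hpre
  unfold Spec_find_max_sequence find_max_sequence find_max_sequence_alt
  obtain ⟨cols, vs, hc1, hc2, hc3⟩ :=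
    go_eq tree (((tree.length : Int) - 1 - level).toNat) level idx
      (pvInitSeq tree max_seq) rfl hle (winCore_of_win hg hw)
  rw [hc3, hc1]
  dsimp only
  rw [hc2]
  dsimp only
  rw [bInit_eq]
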